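-- pv_equiv track=rewrite | github.com/IsaacG/Advent-of-Code | everybody_codes/quest_01.py | solve
-- ===== SOURCE A (Python) =====
-- def solve(part: int, data: str) -> int:
--     costs = {"A": 0, "B": 1, "C": 3, "D": 5, "x": 0}
--     total = 0
--     for i in range(0, len(data), part):
--         chunk = data[i:i + part]
--         total += sum(costs[char] for char in chunk)
--         group_size = sum(char != "x" for char in chunk)
--         if group_size == 2:
--             total += 2
--         elif group_size == 3:
--             total += 6
--     return total
-- ===== SOURCE B (Python) =====
-- def solve(part: int, data: str) -> int:
--     costs = {"A": 0, "B": 1, "C": 3, "D": 5, "x": 0}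
--     # Base cost from a frequency table built once: cost paid per distinct character.
--     freq = {}
--     for c in data:
--         freq[c] = freq.get(c, 0) + 1
--     total = sum(costs[ch] * n for ch, n in freq.items())
--     # Chunk bonuses by a streaming countdown over the characters: no slicing, no stepped range.
--     group = 0
--     left = part
--     for c in data:
--         if left == 0:
--             total += 2 if group == 2 else 6 if group == 3 else 0
--             group = 0
--             left = part
--         if c != "x":
--             group += 1
--         left -= 1
--     if data:
--         total += 2 if group == 2 else 6 if group == 3 else 0
--     return total
-- ===== Notes on version B (the rewrite author's own statement) =====
-- stated objective: alternative
-- what changed: B drops A's stepped-range-and-slice chunk loop entirely: it computes the base cost from a character frequency table built in one dict pass (cost looked up once per distinct character, weighted by its count), and adds the chunk bonuses by a streaming countdown scan that flushes a group counter at chunk boundaries, never materialising a chunk.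
-- outside the precondition, e.g. on solve(-2, 'BC'): A returns 0, B returns 6; on solve(-1, 'Z'): A returns 0, B raises KeyError
import Mathlib
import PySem

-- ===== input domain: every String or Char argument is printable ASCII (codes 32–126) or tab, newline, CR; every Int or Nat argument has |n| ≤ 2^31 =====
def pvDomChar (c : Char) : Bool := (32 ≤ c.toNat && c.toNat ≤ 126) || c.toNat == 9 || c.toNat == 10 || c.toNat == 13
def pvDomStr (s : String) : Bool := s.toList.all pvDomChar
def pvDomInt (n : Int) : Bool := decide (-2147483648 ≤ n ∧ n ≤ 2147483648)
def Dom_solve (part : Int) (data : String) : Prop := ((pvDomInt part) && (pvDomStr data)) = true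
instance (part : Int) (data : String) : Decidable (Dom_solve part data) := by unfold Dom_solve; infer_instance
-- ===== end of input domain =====

-- B replaces A's stepped-range/slice chunk loop by a closed-form base cost from a character
-- frequency table plus a streaming countdown scan for the chunk bonuses; objective: alternative.

-- ===== PORT A =====
def pvCosts : PySem.Dict Char Int := PySem.Dict.ofList [('A', 0), ('B', 1), ('C', 3), ('D', 5), ('x', 0)]

def solve (part : Int) (data : String) : Int :=
  let cs := data.toList
  (PySem.List.pyRange 0 (cs.length : Int) part).foldl (fun total i =>
    let chunk := PySem.List.slice cs (some i) (some (i + part))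
    let total := total + (chunk.map (fun c => PySem.Dict.getD pvCosts c 0)).sum
    let groupSize : Int := (chunk.map (fun c => if c ≠ 'x' then (1 : Int) else 0)).sum
    if groupSize = 2 then total + 2
    else if groupSize = 3 then total + 6
    else total) 0

-- ===== PORT B =====
-- one step of B's streaming bonus loop (flush at left = 0, then count the character)
def bstep (part : Int) (st : Int × Int × Int) (c : Char) : Int × Int × Int :=
  let p := if st.2.2 = 0 then
      (st.1 + (if st.2.1 = 2 then (2 : Int) else if st.2.1 = 3 then 6 else 0), (0 : Int), part)
    else st
  let group' := if c ≠ 'x' then p.2.1 + 1 else p.2.1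
  (p.1, group', p.2.2 - 1)

def solve_alt (part : Int) (data : String) : Int :=
  let cs := data.toList
  let freq := cs.foldl (fun (d : PySem.Dict Char Int) c => d.insert c (d.getD c 0 + 1)) PySem.Dict.empty
  let total := (freq.items.map (fun p => PySem.Dict.getD pvCosts p.1 0 * p.2)).sum
  let st := cs.foldl (bstep part) (total, 0, part)
  if cs ≠ [] then st.1 + (if st.2.1 = 2 then 2 else if st.2.1 = 3 then 6 else 0) else st.1

-- ===== PRECONDITION & SPEC =====
-- Pre_ keeps the natural domain: part ≥ 1 and only creature letters / 'x'. Outside it A raises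
-- (KeyError on other characters, ValueError at part = 0), except that for negative part A's
-- empty range accidentally returns 0 without ever reading data, while B's frequency/stream
-- passes do read data (raising KeyError on other characters, or returning the cost of the
-- whole string as one unfinished group); those nonsense inputs are excluded.
def Pre_solve (part : Int) (data : String) : Prop :=
  1 ≤ part ∧ data.toList.all (fun c => c == 'A' || c == 'B' || c == 'C' || c == 'D' || c == 'x') = true
instance (part : Int) (data : String) : Decidable (Pre_solve part data) := by
  unfold Pre_solve; infer_instance

def pvWitness_solve : Int × String := (1, "A")

def Spec_solve (part : Int) (data : String) (out : Int) : Prop := out = solve_alt part data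
instance (part : Int) (data : String) (out : Int) : Decidable (Spec_solve part data out) := by
  unfold Spec_solve; infer_instance

-- ===== CLAIM (what is proved, stated in full; the proofs are below) =====
def Claim_equal_solve : Prop := ∀ (part : Int) (data : String), Dom_solve part data → Pre_solve part data → Spec_solve part data (solve part data)

-- ===== LEMMAS AND PROOFS =====

-- the 0/1 non-'x' group size and the bonus table
def pvNonx (chunk : List Char) : Int := (chunk.map (fun c => if c ≠ 'x' then (1 : Int) else 0)).sum
def pvBonus (g : Int) : Int := if g = 2 then 2 else if g = 3 then 6 else 0

lemma pyRange_shift (a b c : Int) {s : Int} (hs : 0 < s) :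
    PySem.List.pyRange (a + c) (b + c) s = (PySem.List.pyRange a b s).map (· + c) := by
  rw [PySem.List.pyRange_of_pos _ _ hs, PySem.List.pyRange_of_pos _ _ hs, List.map_map]
  have h1 : (if a + c < b + c then ((b + c - (a + c) + s - 1) / s).toNat else 0)
      = (if a < b then ((b - a + s - 1) / s).toNat else 0) := by
    have e : b + c - (a + c) = b - a := by ring
    by_cases hab : a < b
    · simp [e, hab, show a + c < b + c by omega]
    · simp [hab, show ¬(a + c < b + c) by omega]
  rw [h1]
  exact List.map_congr_left (fun k _ => by simp; ring)

lemma pyRange_pos_cons {a b s : Int} (hs : 0 < s) (hab : a < b) :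
    PySem.List.pyRange a b s = a :: PySem.List.pyRange (a + s) b s := by
  rw [PySem.List.pyRange_of_pos _ _ hs, PySem.List.pyRange_of_pos _ _ hs]
  have e2 : (b - a + s - 1) / s = (b - a - 1) / s + 1 := by
    have e1 : b - a + s - 1 = (b - a - 1) + 1 * s := by ring
    rw [e1, Int.add_mul_ediv_right _ _ (by omega : s ≠ 0)]
  have e3 : 0 ≤ (b - a - 1) / s := Int.ediv_nonneg (by omega) (by omega)
  by_cases h : a + s < b
  · have e0 : b - (a + s) + s - 1 = b - a - 1 := by ring
    have hN : (if a < b then ((b - a + s - 1) / s).toNat else 0)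
        = (if a + s < b then ((b - (a + s) + s - 1) / s).toNat else 0) + 1 := by
      simp [hab, h, e0]; omega
    rw [hN, List.range_succ_eq_map, List.map_cons, List.map_map]
    congr 1
    · simp
    · exact List.map_congr_left (fun k _ => by
        simp [Function.comp, Nat.succ_eq_add_one]; ring)
  · have ez : (b - a - 1) / s = 0 := Int.ediv_eq_zero_of_lt (by omega) (by omega)
    have hN : (if a < b then ((b - a + s - 1) / s).toNat else 0) = 1 := by
      simp [hab]; omega
    simp [hN, h]

-- the slice of a later chunk is the corresponding slice of the dropped list
lemma slice_chunk_shift {s : Int} (hs : 1 ≤ s) (cs : List Char) {i : Int} (hi : 0 ≤ i) :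
    PySem.List.slice cs (some (i + s)) (some (i + s + s))
      = PySem.List.slice (cs.drop s.toNat) (some i) (some (i + s)) := by
  rw [PySem.List.slice_toNat cs (by omega) (by omega),
      PySem.List.slice_toNat (cs.drop s.toNat) (by omega) (by omega),
      List.drop_drop]
  have e1 : (i + s + s).toNat - (i + s).toNat = (i + s).toNat - i.toNat := by omega
  have e2 : s.toNat + i.toNat = (i + s).toNat := by omega
  rw [e1, e2]

-- chunks taken at 0, s, 2s, … partition the list, so a per-chunk sum is the flat sum
lemma chunkSum {s : Int} (hs : 1 ≤ s) (f : Char → Int) :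
    ∀ (N : Nat) (cs : List Char), cs.length ≤ N →
      ((PySem.List.pyRange 0 (cs.length : Int) s).map
        (fun i => ((PySem.List.slice cs (some i) (some (i + s))).map f).sum)).sum
      = (cs.map f).sum := by
  intro N
  induction N with
  | zero =>
    intro cs h
    have : cs = [] := List.length_eq_zero_iff.mp (Nat.le_zero.mp h)
    subst this
    simp [PySem.List.pyRange_of_pos _ _ (by omega : (0:Int) < s)]
  | succ N ih =>
    intro cs hlen
    by_cases hnil : cs = []
    · subst hnil
      simp [PySem.List.pyRange_of_pos _ _ (by omega : (0:Int) < s)]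
    · have hpos : 0 < (cs.length : Int) := by
        have := List.length_pos_of_ne_nil hnil; omega
      rw [pyRange_pos_cons (by omega) hpos, List.map_cons, List.sum_cons]
      have hfirst : PySem.List.slice cs (some 0) (some (0 + s)) = cs.take s.toNat := by
        rw [PySem.List.slice_toNat cs le_rfl (by omega)]
        simp
      have hshift : PySem.List.pyRange (0 + s) ((cs.length : Int)) s
          = (PySem.List.pyRange 0 ((cs.length : Int) - s) s).map (· + s) := by
        have := pyRange_shift 0 ((cs.length : Int) - s) s (by omega : (0:Int) < s)
        simpa using this
      rw [hfirst, hshift, List.map_map]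
      have hmap : (List.map ((fun i =>
            (List.map f (PySem.List.slice cs (some i) (some (i + s)))).sum) ∘ fun x => x + s)
            (PySem.List.pyRange 0 ((cs.length : Int) - s) s))
          = List.map (fun i =>
              (List.map f (PySem.List.slice (cs.drop s.toNat) (some i) (some (i + s)))).sum)
            (PySem.List.pyRange 0 ((cs.length : Int) - s) s) :=
        List.map_congr_left (fun i hi => by
          have hi0 : 0 ≤ i := ((PySem.List.mem_pyRange_iff_of_pos (by omega) i).mp hi).1
          simp [slice_chunk_shift hs cs hi0])
      rw [hmap]
      have hlenle : (cs.drop s.toNat).length ≤ N := by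
        simp [List.length_drop]; omega
      by_cases hsl : s ≤ (cs.length : Int)
      · have hlend : ((cs.drop s.toNat).length : Int) = (cs.length : Int) - s := by
          simp [List.length_drop]; omega
        have := ih (cs.drop s.toNat) hlenle
        rw [hlend] at this
        rw [this]
        conv_rhs => rw [← List.take_append_drop s.toNat cs]
        rw [List.map_append, List.sum_append]
      · have hrest : PySem.List.pyRange 0 ((cs.length : Int) - s) s = [] := by
          rw [PySem.List.pyRange_of_pos _ _ (by omega : (0:Int) < s)]
          simp
          intro h
          exact absurd h (by omega)
        have hdrop : cs.drop s.toNat = [] := by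
          apply List.drop_eq_nil_of_le; omega
        have htake : cs.take s.toNat = cs := List.take_of_length_le (by omega)
        simp [hrest, hdrop, htake]

-- A's interleaved loop in additive form
lemma stepA (S G : Int → Int) (l : List Int) (init : Int) :
    l.foldl (fun total i =>
        if G i = 2 then (total + S i) + 2
        else if G i = 3 then (total + S i) + 6
        else (total + S i)) init
      = init + (l.map (fun i => S i + pvBonus (G i))).sum := by
  have hf : (fun (total i : Int) =>
        if G i = 2 then (total + S i) + 2
        else if G i = 3 then (total + S i) + 6
        else (total + S i))
      = fun total i => total + (S i + pvBonus (G i)) := by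
    funext t i; unfold pvBonus; split_ifs <;> ring
  rw [hf, PySem.List.foldl_add]

-- the frequency-weighted cost sum over the distinct characters is the flat cost sum
lemma weighted_count_sum (f : Char → Int) (cs : List Char) :
    ((PySem.Set.ofList cs).map (fun k => f k * (cs.count k : Int))).sum = (cs.map f).sum := by
  have hperm : (PySem.Set.ofList cs).Perm cs.dedup := by
    apply List.perm_of_nodup_nodup_toFinset_eq (PySem.Set.nodup_ofList cs) cs.nodup_dedup
    ext x
    simp [PySem.Set.mem_ofList]
  have hfs : cs.dedup.toFinset = cs.toFinset := by ext x; simp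
  rw [(hperm.map _).sum_eq, ← List.sum_toFinset _ cs.nodup_dedup, hfs]
  rw [show (List.map f cs).sum = ∑ m ∈ cs.toFinset, List.count m cs • f m from (Finset.sum_list_map_count cs f)]
  refine Finset.sum_congr rfl (fun m _ => ?_)
  rw [nsmul_eq_mul, mul_comm]


-- within one chunk the countdown never reaches 0, so B's loop only counts the group
lemma bstep_noflush (s : Int) :
    ∀ (chunk : List Char) (total g left : Int), (chunk.length : Int) ≤ left →
      chunk.foldl (bstep s) (total, g, left)
        = (total, g + pvNonx chunk, left - (chunk.length : Int)) := by
  intro chunk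
  induction chunk with
  | nil => intro total g left _; simp [pvNonx]
  | cons c t ih =>
    intro total g left hle
    have hlen : ((c :: t).length : Int) = (t.length : Int) + 1 := by simp
    have hne : ¬ (left = 0) := by omega
    have hstep : bstep s (total, g, left) c
        = (total, g + (if c ≠ 'x' then (1:Int) else 0), left - 1) := by
      simp [bstep, hne]
      by_cases hx : c = 'x' <;> simp [hx]
    rw [List.foldl_cons, hstep, ih _ _ _ (by omega)]
    have : pvNonx (c :: t) = (if c ≠ 'x' then (1:Int) else 0) + pvNonx t := by
      simp [pvNonx]
    rw [this]
    refine Prod.ext (by ring_nf) (Prod.ext (by dsimp; ring) (by dsimp; omega))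

-- B's finaliser
def pvFin (cs : List Char) (st : Int × Int × Int) : Int :=
  if cs ≠ [] then st.1 + pvBonus st.2.1 else st.1

-- B's streaming bonus loop computes exactly A's per-chunk bonus sum
lemma bloop_eq_chunkBonus {s : Int} (hs : 1 ≤ s) :
    ∀ (N : Nat) (cs : List Char), cs.length ≤ N → ∀ (total : Int),
      pvFin cs (cs.foldl (bstep s) (total, 0, s))
        = total + ((PySem.List.pyRange 0 (cs.length : Int) s).map
            (fun i => pvBonus (pvNonx (PySem.List.slice cs (some i) (some (i + s)))))).sum := by
  intro N
  induction N with
  | zero =>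
    intro cs h total
    have : cs = [] := List.length_eq_zero_iff.mp (Nat.le_zero.mp h)
    subst this
    simp [pvFin, PySem.List.pyRange_of_pos _ _ (by omega : (0:Int) < s)]
  | succ N ih =>
    intro cs hlen total
    by_cases hnil : cs = []
    · subst hnil
      simp [pvFin, PySem.List.pyRange_of_pos _ _ (by omega : (0:Int) < s)]
    · have hpos : 0 < (cs.length : Int) := by
        have := List.length_pos_of_ne_nil hnil; omega
      have hfirst : PySem.List.slice cs (some 0) (some (0 + s)) = cs.take s.toNat := by
        rw [PySem.List.slice_toNat cs le_rfl (by omega)]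
        simp
      have hshift : PySem.List.pyRange (0 + s) ((cs.length : Int)) s
          = (PySem.List.pyRange 0 ((cs.length : Int) - s) s).map (· + s) := by
        have := pyRange_shift 0 ((cs.length : Int) - s) s (by omega : (0:Int) < s)
        simpa using this
      have hmap : (List.map ((fun i =>
            pvBonus (pvNonx (PySem.List.slice cs (some i) (some (i + s))))) ∘ fun x => x + s)
            (PySem.List.pyRange 0 ((cs.length : Int) - s) s))
          = List.map (fun i =>
              pvBonus (pvNonx (PySem.List.slice (cs.drop s.toNat) (some i) (some (i + s)))))
            (PySem.List.pyRange 0 ((cs.length : Int) - s) s) :=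
        List.map_congr_left (fun i hi => by
          have hi0 : 0 ≤ i := ((PySem.List.mem_pyRange_iff_of_pos (by omega) i).mp hi).1
          simp [slice_chunk_shift hs cs hi0])
      rw [pyRange_pos_cons (by omega) hpos, List.map_cons, List.sum_cons, hfirst,
          hshift, List.map_map, hmap]
      -- split the fold at the first chunk
      by_cases hsl : (cs.length : Int) ≤ s
      · -- single (possibly short) chunk: no flush, final flush adds its bonus
        have htake : cs.take s.toNat = cs := List.take_of_length_le (by omega)
        have hflat := bstep_noflush s cs total 0 s (by omega)
        have hrest : PySem.List.pyRange 0 ((cs.length : Int) - s) s = [] := by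
          rw [PySem.List.pyRange_of_pos _ _ (by omega : (0:Int) < s)]
          simp
          intro h
          exact absurd h (by omega)
        simp [pvFin, hnil, hflat, hrest, htake]
      · -- full first chunk, then the stream restarts on the dropped tail
        have htklen : (cs.take s.toNat).length = s.toNat := by
          simp; omega
        have hsplit : cs = cs.take s.toNat ++ cs.drop s.toNat := (List.take_append_drop _ _).symm
        have hdrne : cs.drop s.toNat ≠ [] := by
          intro h
          rw [List.drop_eq_nil_iff] at h
          omega
        obtain ⟨c, dt, hdr⟩ := List.exists_cons_of_ne_nil hdrne
        have hflat := bstep_noflush s (cs.take s.toNat) total 0 s (by rw [htklen]; omega)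
        have hfold : cs.foldl (bstep s) (total, 0, s)
            = (cs.drop s.toNat).foldl (bstep s)
                (total + pvBonus (pvNonx (cs.take s.toNat)), 0, s) := by
          conv_lhs => rw [hsplit]
          rw [List.foldl_append, hflat, htklen, hdr, List.foldl_cons, List.foldl_cons]
          congr 1
          have hz : (s : Int) - (s.toNat : Int) = 0 := by omega
          rw [hz]
          simp [bstep, pvBonus]
        have hlend : (cs.drop s.toNat).length ≤ N := by
          simp [List.length_drop]; omega
        have hlint : ((cs.drop s.toNat).length : Int) = (cs.length : Int) - s := by
          simp [List.length_drop]; omega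
        have hfin : pvFin cs (cs.foldl (bstep s) (total, 0, s))
            = pvFin (cs.drop s.toNat) ((cs.drop s.toNat).foldl (bstep s)
                (total + pvBonus (pvNonx (cs.take s.toNat)), 0, s)) := by
          rw [hfold]
          simp [pvFin, hnil, hdrne]
        rw [hfin, ih _ hlend, hlint]
        ring

lemma solve_eq_alt (part : Int) (data : String) (hp : 1 ≤ part) :
    solve part data = solve_alt part data := by
  have hfreq : data.toList.foldl (fun (d : PySem.Dict Char Int) c => d.insert c (d.getD c 0 + 1))
      PySem.Dict.empty = PySem.Dict.counter data.toList :=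
    PySem.Dict.foldl_insert_getD_add_one_eq_counter data.toList
  have hbase : ((data.toList.foldl (fun (d : PySem.Dict Char Int) c => d.insert c (d.getD c 0 + 1))
        PySem.Dict.empty).items.map (fun p => PySem.Dict.getD pvCosts p.1 0 * p.2)).sum
      = (data.toList.map (fun c => PySem.Dict.getD pvCosts c 0)).sum := by
    rw [hfreq, PySem.Dict.items_counter, List.map_map]
    exact weighted_count_sum (fun c => PySem.Dict.getD pvCosts c 0) data.toList
  have hB := bloop_eq_chunkBonus hp data.toList.length data.toList le_rfl
    ((data.toList.foldl (fun (d : PySem.Dict Char Int) c => d.insert c (d.getD c 0 + 1))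
        PySem.Dict.empty).items.map (fun p => PySem.Dict.getD pvCosts p.1 0 * p.2)).sum
  unfold solve solve_alt
  rw [stepA (fun i => ((PySem.List.slice data.toList (some i) (some (i + part))).map
        (fun c => PySem.Dict.getD pvCosts c 0)).sum)
      (fun i => ((PySem.List.slice data.toList (some i) (some (i + part))).map
        (fun c => if c ≠ 'x' then (1 : Int) else 0)).sum)]
  rw [PySem.List.sum_map_add_int]
  rw [chunkSum hp (fun c => PySem.Dict.getD pvCosts c 0) data.toList.length data.toList le_rfl]
  simp only [pvFin, pvNonx, pvBonus] at hB
  rw [hB, hbase]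
  simp only [pvBonus]
  exact zero_add _

-- ===== VERDICT (by name: the statement is the Claim_ definition above) =====
theorem solve_spec : Claim_equal_solve := by
  intro part data _ hpre
  unfold Spec_solve
  exact solve_eq_alt part data hpre.1
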